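-- pv_equiv track=rewrite | github.com/docxology/ivm-xyz | ivm_xyz/polyhedra/edge_counting.py | tet_edges
-- ===== SOURCE A (Python) =====
-- def tri(n: int) -> int:
--     """Triangular number n."""
--     return n * (n + 1) // 2
--
-- def tet_edges(f: int) -> int:
--     """
--     Number of contact points between equal spheres arranged in a tetrahedron
--     with f intervals along each edge.
--
--     Each layer of tri(N) balls spawns N tetrahedrons of 6 edges each,
--     accumulating to give a next layer of tri(N+1) balls, and so on.
--
--     Args:
--         f: Frequency (number of intervals along each edge)
--
--     Returns:
--         int: Total number of edges/contact points
--
--     References: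
--         https://oeis.org/A007531
--     """
--     cumm = 0
--     for layer in range(1, f + 1):
--         if layer == 1:
--             cumm = 6
--         else:
--             cumm = cumm + tri(layer) * 6
--     return cumm
-- ===== SOURCE B (Python) =====
-- def tet_edges(f: int) -> int:
--     """Closed form (OEIS A007531 shifted): f(f+1)(f+2), 0 for f <= 0."""
--     return f * (f + 1) * (f + 2) if f > 0 else 0
-- ===== Notes on version B (the rewrite author's own statement) =====
-- stated objective: faster
-- what changed: Replaced the layer-accumulating loop over range(1, f+1) by the closed form f*(f+1)*(f+2) (6 * sum of triangular numbers = 6*C(f+2,3)), returning 0 for f <= 0.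
import Mathlib
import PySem

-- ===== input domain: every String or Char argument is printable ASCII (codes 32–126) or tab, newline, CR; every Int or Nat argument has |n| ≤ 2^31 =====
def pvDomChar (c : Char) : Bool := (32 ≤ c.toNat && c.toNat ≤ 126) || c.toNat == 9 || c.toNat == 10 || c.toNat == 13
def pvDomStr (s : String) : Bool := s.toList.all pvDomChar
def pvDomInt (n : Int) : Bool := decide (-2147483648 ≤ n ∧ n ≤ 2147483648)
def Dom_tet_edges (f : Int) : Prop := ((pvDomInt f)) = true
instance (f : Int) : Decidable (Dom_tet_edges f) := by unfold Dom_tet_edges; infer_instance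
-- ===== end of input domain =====

-- B replaces A's O(f) accumulation loop by the closed form f*(f+1)*(f+2) (0 for f ≤ 0); objective: faster.

-- ===== PORT A =====
def tri (n : Int) : Int := PySem.Int.floordiv (n * (n + 1)) 2

def tet_edges (f : Int) : Int :=
  (PySem.List.pyRange 1 (f + 1) 1).foldl
    (fun cumm layer => if layer == 1 then 6 else cumm + tri layer * 6) 0

-- ===== PORT B =====
def tet_edges_alt (f : Int) : Int := if f > 0 then f * (f + 1) * (f + 2) else 0

-- ===== PRECONDITION & SPEC =====
def Spec_tet_edges (f : Int) (out : Int) : Prop := out = tet_edges_alt f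
instance (f : Int) (out : Int) : Decidable (Spec_tet_edges f out) := by unfold Spec_tet_edges; infer_instance

-- ===== CLAIM (what is proved, stated in full; the proofs are below) =====
def Claim_equal_tet_edges : Prop := ∀ (f : Int), Dom_tet_edges f → Spec_tet_edges f (tet_edges f)

-- ===== LEMMAS AND PROOFS =====

theorem tri_six (n : Int) : tri n * 6 = 3 * n * (n + 1) := by
  unfold tri
  rw [PySem.Int.floordiv_eq_ediv_of_pos (by norm_num)]
  obtain ⟨k, hk⟩ := Int.even_mul_succ_self n
  rw [hk]
  have h2 : (k + k) / 2 = k := by omega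
  rw [h2]
  linear_combination (-3 : Int) * hk

-- A's loop, started from any layer index m ≥ 2 with accumulator c, adds 6·tri(k) for k in [m, b).
theorem foldl_tail (b m : Int) (hm : 2 ≤ m) (c : Int) :
    (PySem.List.pyRange m b 1).foldl
      (fun cumm layer => if layer == 1 then 6 else cumm + tri layer * 6) c
    = if m ≤ b then c + (b - 1) * b * (b + 1) - (m - 1) * m * (m + 1) else c := by
  by_cases h : m < b
  · rw [PySem.List.pyRange_one_cons h]
    simp only [List.foldl_cons]
    have hne : (m == 1) = false := by simp; omega
    rw [hne]
    simp only [Bool.false_eq_true, if_false]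
    rw [foldl_tail b (m + 1) (by omega) (c + tri m * 6), tri_six]
    have hmb : m + 1 ≤ b := by omega
    have hmb' : m ≤ b := by omega
    simp only [if_pos hmb, if_pos hmb']
    ring
  · rw [PySem.List.pyRange_one_eq_nil (by omega)]
    simp only [List.foldl_nil]
    split_ifs with h'
    · have hbm : m = b := by omega
      subst hbm; ring
    · rfl
termination_by (b - m).toNat
decreasing_by omega

-- ===== VERDICT (by name: the statement is the Claim_ definition above) =====
theorem tet_edges_spec : Claim_equal_tet_edges := by
  intro f _
  unfold Spec_tet_edges tet_edges tet_edges_alt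
  by_cases hf : 0 < f
  · rw [PySem.List.pyRange_one_cons (by omega)]
    simp only [List.foldl_cons, BEq.rfl, if_pos]
    norm_num only
    rw [foldl_tail (f + 1) 2 (by omega) 6]
    rw [if_pos (by omega), if_pos hf]
    ring
  · rw [PySem.List.pyRange_one_eq_nil (by omega)]
    simp only [List.foldl_nil, if_neg hf]
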